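-- pv_equiv track=rewrite | github.com/Brivacanda/CCCpractice | Square Pool 2022.py | tree_check
-- ===== SOURCE A (Python) =====
-- def tree_check(tree_locations, x, y, size): #x y's of current every tile of current square, size should start at 1
--     max_distance = len(tree_locations[0])
--     new_locations = []
--     #if doesn't go out of bounds
--     if x[-1]+1 < max_distance and y[-1]+1 < max_distance:
--         x.append(x[-1]+1)
--         y.append(y[-1]+1)
--         for i in range(len(x)):
--             new_locations.append(tree_locations[y[-1]][x[i]]) #new row included below it as y is increased and all xplus the corner oneis included
--             new_locations.append(tree_locations[y[i]][x[-1]]) #y[i] just column to the right and x[-1] shifts it so its new bc we increased b4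
--         if 1 in new_locations:
--             return size #end bc cant expand anymore
--         else: #if it can still expand
--             #expand
--             return tree_check(tree_locations, x, y, size+1)
--     else: #if at edge of the map
--         #return current size
--         return size
-- ===== SOURCE B (Python) =====
-- def tree_check(tree_locations, x, y, size):
--     # Iterative re-implementation: explicit while loop on local copies (no caller
--     # mutation, unlike A), no new_locations list -- the fresh L-border is scanned
--     # with two short-circuiting any() passes instead.
--     n = len(tree_locations[0])
--     xs, ys = list(x), list(y)
--     while xs[-1] + 1 < n and ys[-1] + 1 < n:
--         xs.append(xs[-1] + 1)
--         ys.append(ys[-1] + 1)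
--         row = tree_locations[ys[-1]]
--         last_col = xs[-1]
--         if any(row[xi] == 1 for xi in xs) or any(tree_locations[yi][last_col] == 1 for yi in ys):
--             return size
--         size += 1
--     return size
-- ===== Notes on version B (the rewrite author's own statement) =====
-- stated objective: simpler
-- what changed: Tail recursion with in-place mutation of the caller's x/y and a materialised new_locations list is replaced by an explicit while loop over local copies that checks the new L-border with two short-circuiting any() passes, so no membership list is ever built.
-- outside the precondition, e.g. on tree_check([[], [1], [1, 0, 0]], [-2], [-1, 2, -2], 2): A returns 3, B returns 2; on tree_check([[0], [0, 1, 0], [0, 0, 0, 0]], [-1], [-2], 3): A returns 4, B returns 4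
import Mathlib
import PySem

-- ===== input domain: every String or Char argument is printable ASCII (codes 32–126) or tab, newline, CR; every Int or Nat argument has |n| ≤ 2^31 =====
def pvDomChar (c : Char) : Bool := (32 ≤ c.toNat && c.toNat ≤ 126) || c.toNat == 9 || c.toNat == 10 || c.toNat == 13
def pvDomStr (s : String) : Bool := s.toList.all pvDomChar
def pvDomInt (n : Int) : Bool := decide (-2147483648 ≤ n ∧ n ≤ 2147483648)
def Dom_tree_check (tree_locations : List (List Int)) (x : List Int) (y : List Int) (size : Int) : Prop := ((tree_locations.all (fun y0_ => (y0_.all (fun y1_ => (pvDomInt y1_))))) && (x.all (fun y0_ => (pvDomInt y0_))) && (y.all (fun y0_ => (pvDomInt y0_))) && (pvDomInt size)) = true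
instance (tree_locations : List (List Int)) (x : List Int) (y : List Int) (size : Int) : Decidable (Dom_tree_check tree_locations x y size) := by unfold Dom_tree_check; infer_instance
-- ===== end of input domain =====

-- B replaces A's tail recursion (which mutates the caller's x/y in place) by a while loop on
-- local copies with two short-circuiting border scans; the equivalence proved is about the
-- RETURN value only (B performs no caller-visible mutation).

-- ===== PORT A =====
-- tree_locations[r][c]; Python raises IndexError where a pyGet? is none, excluded by Pre_
def pvCellA (g : List (List Int)) (r c : Int) : Int :=
  (PySem.List.pyGet? ((PySem.List.pyGet? g r).getD []) c).getD 0

def tree_check (tree_locations : List (List Int)) (x : List Int) (y : List Int) (size : Int) : Int :=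
  let md : Int := ((PySem.List.pyGet? tree_locations 0).getD []).length
  let xl : Int := (PySem.List.pyGet? x (-1)).getD 0
  let yl : Int := (PySem.List.pyGet? y (-1)).getD 0
  if h : xl + 1 < md ∧ yl + 1 < md then
    let x' := x ++ [xl + 1]
    let y' := y ++ [yl + 1]
    let new_locations := (List.range x'.length).foldl (fun (acc : List Int) (i : Nat) =>
      acc ++ [pvCellA tree_locations ((PySem.List.pyGet? y' (-1)).getD 0) ((PySem.List.pyGet? x' (Int.ofNat i)).getD 0),
              pvCellA tree_locations ((PySem.List.pyGet? y' (Int.ofNat i)).getD 0) ((PySem.List.pyGet? x' (-1)).getD 0)]) []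
    if (1 : Int) ∈ new_locations then size
    else tree_check tree_locations x' y' (size + 1)
  else size
termination_by ((((PySem.List.pyGet? tree_locations 0).getD []).length : Int) - (PySem.List.pyGet? x (-1)).getD 0).toNat
decreasing_by
  simp only [PySem.List.pyGet?_neg_one_append_singleton, Option.getD_some]
  omega

-- ===== PORT B =====
def pvRowHit (row : List Int) (xs : List Int) : Bool :=
  xs.any (fun xi => ((PySem.List.pyGet? row xi).getD 0) == 1)

def pvColHit (g : List (List Int)) (ys : List Int) (c : Int) : Bool :=
  ys.any (fun yi => ((PySem.List.pyGet? ((PySem.List.pyGet? g yi).getD []) c).getD 0) == 1)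

def pvLoop (g : List (List Int)) (n : Int) (xs ys : List Int) (size : Int) : Int :=
  let xl : Int := (PySem.List.pyGet? xs (-1)).getD 0
  let yl : Int := (PySem.List.pyGet? ys (-1)).getD 0
  if h : xl + 1 < n ∧ yl + 1 < n then
    let xs' := xs ++ [xl + 1]
    let ys' := ys ++ [yl + 1]
    let row := (PySem.List.pyGet? g (yl + 1)).getD []
    if pvRowHit row xs' || pvColHit g ys' (xl + 1) then size
    else pvLoop g n xs' ys' (size + 1)
  else size
termination_by (n - (PySem.List.pyGet? xs (-1)).getD 0).toNat
decreasing_by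
  simp only [PySem.List.pyGet?_neg_one_append_singleton, Option.getD_some]
  omega

def tree_check_alt (tree_locations : List (List Int)) (x : List Int) (y : List Int) (size : Int) : Int :=
  let n : Int := ((PySem.List.pyGet? tree_locations 0).getD []).length
  pvLoop tree_locations n x y size

-- ===== PRECONDITION & SPEC =====
-- Pre_ restricts to the inputs where neither program raises and to the function's natural
-- domain: whenever the expansion loop actually runs, the grid must have rows at least as
-- long as row 0 and at least that many rows, and x and y must be equally long lists of
-- coordinates with absolute value within the grid side N (outside this, A either raises
-- IndexError, returns only via accidental deeper negative-index wraparound or a luckily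
-- in-range ragged row, or — with len(x) ≠ len(y) — scans a border cell set no natural
-- reading of the paired-coordinates contract specifies).
def Pre_tree_check (tree_locations : List (List Int)) (x : List Int) (y : List Int) (size : Int) : Prop :=
  tree_locations ≠ [] ∧ x ≠ [] ∧
  ((x.getLastD 0 + 1 < ((tree_locations.headD []).length : Int)) → y ≠ []) ∧
  ((x.getLastD 0 + 1 < ((tree_locations.headD []).length : Int) ∧
    y.getLastD 0 + 1 < ((tree_locations.headD []).length : Int)) →
    (x.length = y.length ∧
     ((tree_locations.headD []).length : Int) ≤ (tree_locations.length : Int) ∧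
     (∀ r ∈ tree_locations, ((tree_locations.headD []).length : Int) ≤ (r.length : Int)) ∧
     (∀ e ∈ x, -((tree_locations.headD []).length : Int) ≤ e ∧ e < ((tree_locations.headD []).length : Int)) ∧
     (∀ e ∈ y, -((tree_locations.headD []).length : Int) ≤ e ∧ e < ((tree_locations.headD []).length : Int))))
instance (tree_locations : List (List Int)) (x : List Int) (y : List Int) (size : Int) : Decidable (Pre_tree_check tree_locations x y size) := by unfold Pre_tree_check; infer_instance

def pvWitness_tree_check : List (List Int) × List Int × List Int × Int := ([[0,0],[0,0]], [0], [0], 1)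

def Spec_tree_check (tree_locations : List (List Int)) (x : List Int) (y : List Int) (size : Int) (out : Int) : Prop := out = tree_check_alt tree_locations x y size
instance (tree_locations : List (List Int)) (x : List Int) (y : List Int) (size : Int) (out : Int) : Decidable (Spec_tree_check tree_locations x y size out) := by unfold Spec_tree_check; infer_instance

-- ===== CLAIM (what is proved, stated in full; the proofs are below) =====
def Claim_equal_tree_check : Prop := ∀ (tree_locations : List (List Int)) (x : List Int) (y : List Int) (size : Int), Dom_tree_check tree_locations x y size → Pre_tree_check tree_locations x y size → Spec_tree_check tree_locations x y size (tree_check tree_locations x y size)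

-- ===== LEMMAS AND PROOFS =====

-- A's interleaved border scan finds a 1 iff B's two any-passes do (equal-length x', y')
theorem pvScan_eq (g : List (List Int)) (x' y' : List Int) (r c : Int)
    (hlen : x'.length = y'.length) :
    ((1 : Int) ∈ (List.range x'.length).foldl (fun (acc : List Int) (i : Nat) =>
      acc ++ [pvCellA g r ((PySem.List.pyGet? x' (Int.ofNat i)).getD 0),
              pvCellA g ((PySem.List.pyGet? y' (Int.ofNat i)).getD 0) c]) []) ↔
    (pvRowHit ((PySem.List.pyGet? g r).getD []) x' = true ∨ pvColHit g y' c = true) := by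
  rw [show (fun (acc : List Int) (i : Nat) =>
      acc ++ [pvCellA g r ((PySem.List.pyGet? x' (Int.ofNat i)).getD 0),
              pvCellA g ((PySem.List.pyGet? y' (Int.ofNat i)).getD 0) c]) = (fun acc i =>
      acc ++ (fun i => [pvCellA g r ((PySem.List.pyGet? x' (Int.ofNat i)).getD 0),
              pvCellA g ((PySem.List.pyGet? y' (Int.ofNat i)).getD 0) c]) i) from rfl,
    PySem.List.foldl_append_eq_flatMap]
  have hcast : ∀ (l : List Int) (i : Nat), PySem.List.pyGet? l (Int.ofNat i) = l[i]? := by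
    intro l i; exact_mod_cast PySem.List.pyGet?_natCast l i
  simp only [List.nil_append, List.mem_flatMap, List.mem_range, List.mem_cons,
    List.not_mem_nil, or_false, List.any_eq_true, beq_iff_eq, pvCellA, hcast,
    pvRowHit, pvColHit]
  constructor
  · rintro ⟨i, hi, h1 | h1⟩
    · refine Or.inl ⟨x'[i], List.getElem_mem hi, ?_⟩
      rw [List.getElem?_eq_getElem hi] at h1
      simp at h1; omega
    · refine Or.inr ⟨y'[i]'(hlen ▸ hi), List.getElem_mem _, ?_⟩
      rw [List.getElem?_eq_getElem (hlen ▸ hi)] at h1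
      simp at h1; omega
  · rintro (⟨xi, hmem, hv⟩ | ⟨yi, hmem, hv⟩)
    · obtain ⟨i, hi, rfl⟩ := List.mem_iff_getElem.mp hmem
      exact ⟨i, hi, Or.inl (by rw [List.getElem?_eq_getElem hi]; simp; omega)⟩
    · obtain ⟨i, hi, rfl⟩ := List.mem_iff_getElem.mp hmem
      exact ⟨i, hlen ▸ hi, Or.inr (by rw [List.getElem?_eq_getElem hi]; simp; omega)⟩

-- A equals B's loop whenever x and y are equally long, by induction on the room left
theorem pvKey (g : List (List Int)) : ∀ (k : Nat) (xs ys : List Int) (size : Int),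
    ((((PySem.List.pyGet? g 0).getD []).length : Int) - (PySem.List.pyGet? xs (-1)).getD 0).toNat ≤ k →
    xs.length = ys.length →
    tree_check g xs ys size = pvLoop g (((PySem.List.pyGet? g 0).getD []).length : Int) xs ys size := by
  intro k
  induction k with
  | zero =>
    intro xs ys size hk hlen
    rw [tree_check, pvLoop]
    split_ifs with h
    · omega
    · rfl
  | succ k ih =>
    intro xs ys size hk hlen
    rw [tree_check, pvLoop]
    by_cases h : (PySem.List.pyGet? xs (-1)).getD 0 + 1 < (((PySem.List.pyGet? g 0).getD []).length : Int) ∧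
        (PySem.List.pyGet? ys (-1)).getD 0 + 1 < (((PySem.List.pyGet? g 0).getD []).length : Int)
    · simp only [dif_pos h]
      have hlen' : (xs ++ [(PySem.List.pyGet? xs (-1)).getD 0 + 1]).length
          = (ys ++ [(PySem.List.pyGet? ys (-1)).getD 0 + 1]).length := by
        simp [hlen]
      have hscan := pvScan_eq g (xs ++ [(PySem.List.pyGet? xs (-1)).getD 0 + 1])
        (ys ++ [(PySem.List.pyGet? ys (-1)).getD 0 + 1])
        ((PySem.List.pyGet? ys (-1)).getD 0 + 1) ((PySem.List.pyGet? xs (-1)).getD 0 + 1) hlen'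
      rw [show (PySem.List.pyGet? (ys ++ [(PySem.List.pyGet? ys (-1)).getD 0 + 1]) (-1)).getD 0
            = (PySem.List.pyGet? ys (-1)).getD 0 + 1 from by
          rw [PySem.List.pyGet?_neg_one_append_singleton]; rfl,
        show (PySem.List.pyGet? (xs ++ [(PySem.List.pyGet? xs (-1)).getD 0 + 1]) (-1)).getD 0
            = (PySem.List.pyGet? xs (-1)).getD 0 + 1 from by
          rw [PySem.List.pyGet?_neg_one_append_singleton]; rfl]
      by_cases hhit : pvRowHit ((PySem.List.pyGet? g ((PySem.List.pyGet? ys (-1)).getD 0 + 1)).getD [])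
            (xs ++ [(PySem.List.pyGet? xs (-1)).getD 0 + 1]) = true ∨
          pvColHit g (ys ++ [(PySem.List.pyGet? ys (-1)).getD 0 + 1])
            ((PySem.List.pyGet? xs (-1)).getD 0 + 1) = true
      · rw [if_pos (hscan.mpr hhit), if_pos (by simpa using hhit)]
      · rw [if_neg (fun hm => hhit (hscan.mp hm)), if_neg (by simpa using hhit)]
        exact ih _ _ _ (by
          rw [PySem.List.pyGet?_neg_one_append_singleton]
          simp only [Option.getD_some]
          omega) hlen'
    · simp only [dif_neg h]

theorem pvMain (g : List (List Int)) (x y : List Int) (size : Int)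
    (hpre : Pre_tree_check g x y size) :
    tree_check g x y size = tree_check_alt g x y size := by
  obtain ⟨hg, hx, hy, hmain⟩ := hpre
  rw [tree_check_alt]
  by_cases h : (PySem.List.pyGet? x (-1)).getD 0 + 1 < (((PySem.List.pyGet? g 0).getD []).length : Int) ∧
      (PySem.List.pyGet? y (-1)).getD 0 + 1 < (((PySem.List.pyGet? g 0).getD []).length : Int)
  · have hget : ∀ (l : List Int), (PySem.List.pyGet? l (-1)).getD 0 = l.getLastD 0 := by
      intro l
      rw [PySem.List.pyGet?_neg_one]
      cases h' : l.getLast? <;> simp [List.getLastD_eq_getLast?, h']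
    have hhead : (PySem.List.pyGet? g 0).getD [] = g.headD [] := by
      cases g with
      | nil => simp at hg
      | cons a l => simp
    have hlen : x.length = y.length := by
      refine (hmain ?_).1
      rw [← hget x, ← hget y, ← hhead]
      exact h
    exact pvKey g _ x y size le_rfl hlen
  · rw [tree_check, pvLoop]
    simp only [dif_neg h]

-- ===== VERDICT (by name: the statement is the Claim_ definition above) =====
theorem tree_check_spec : Claim_equal_tree_check := by
  intro g x y size _ hpre
  show tree_check g x y size = tree_check_alt g x y size
  exact pvMain g x y size hpre
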